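-- pv_equiv track=rewrite | github.com/jlittle1223/HackUCI | file_util.py | get_index_of_end_of_first_course_name
-- ===== SOURCE A (Python) =====
-- and_string = " and "
--
-- or_string = " or "
--
-- def get_index_of_end_of_first_course_name(course_string):
--     temp = ''
--     for i in range(len(course_string)):
--         temp += course_string[i]
--         if course_string[i] == ":":
--             return i - 1
--         if ")" in temp:
--             i -= 1
--
--             return i
--         if and_string in temp:
--             return i - len(and_string)
--         if or_string in temp:
--             return i - len(or_string)
--
--     return len(course_string) - 1
-- ===== SOURCE B (Python) =====
-- def get_index_of_end_of_first_course_name(course_string):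
--     positions = [p for p in (course_string.find(t) for t in (":", ")", " and ", " or ")) if p != -1]
--     if positions:
--         return min(positions) - 1
--     return len(course_string) - 1
-- ===== Notes on version B (the rewrite author's own statement) =====
-- stated objective: faster
-- what changed: Replaced the character-accumulating scan with four early returns by four library substring searches (str.find) followed by a single min over the found start positions, returning min-1 (or len-1 if none found).
import Mathlib
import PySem

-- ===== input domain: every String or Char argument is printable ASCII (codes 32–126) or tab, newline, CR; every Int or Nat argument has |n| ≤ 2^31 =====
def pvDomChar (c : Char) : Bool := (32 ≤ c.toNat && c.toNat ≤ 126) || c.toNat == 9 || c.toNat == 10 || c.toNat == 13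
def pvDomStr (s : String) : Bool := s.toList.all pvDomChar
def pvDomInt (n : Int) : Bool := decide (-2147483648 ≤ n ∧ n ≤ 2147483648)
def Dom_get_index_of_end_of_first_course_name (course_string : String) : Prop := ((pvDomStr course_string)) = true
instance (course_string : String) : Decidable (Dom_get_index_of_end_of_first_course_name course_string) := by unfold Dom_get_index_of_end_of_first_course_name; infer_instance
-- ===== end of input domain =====

-- B replaces A's quadratic growing-prefix scan with four linear str.find substring
-- searches and one min over the found start positions (objective: faster, measured).

-- ===== PORT A =====
-- A's for-loop over range(len(course_string)) with the accumulated prefix `temp`,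
-- ported as index recursion carrying `temp`; `")" in temp` etc. via PySem.Chars.isIn.
def pvALoop (cs : List Char) (temp : List Char) (i : Nat) : Int :=
  if h : i < cs.length then
    let temp' := temp ++ [cs[i]]
    if cs[i] = ':' then (i : Int) - 1
    else if PySem.Chars.isIn [')'] temp' then (i : Int) - 1
    else if PySem.Chars.isIn [' ', 'a', 'n', 'd', ' '] temp' then (i : Int) - 5
    else if PySem.Chars.isIn [' ', 'o', 'r', ' '] temp' then (i : Int) - 4
    else pvALoop cs temp' (i + 1)
  else (cs.length : Int) - 1
termination_by cs.length - i

def get_index_of_end_of_first_course_name (course_string : String) : Int :=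
  pvALoop course_string.toList [] 0

-- ===== PORT B =====
def get_index_of_end_of_first_course_name_alt (course_string : String) : Int :=
  let positions := ([":", ")", " and ", " or "].map
      (fun t => PySem.Str.find course_string t)).filter (fun p => p ≠ -1)
  match PySem.List.min? positions (fun x => x) with
  | some m => m - 1
  | none => PySem.Str.len course_string - 1

-- ===== PRECONDITION & SPEC =====
def Spec_get_index_of_end_of_first_course_name (course_string : String) (out : Int) : Prop := out = get_index_of_end_of_first_course_name_alt course_string
instance (course_string : String) (out : Int) : Decidable (Spec_get_index_of_end_of_first_course_name course_string out) := by unfold Spec_get_index_of_end_of_first_course_name; infer_instance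

-- ===== CLAIM (what is proved, stated in full; the proofs are below) =====
def Claim_equal_get_index_of_end_of_first_course_name : Prop := ∀ (course_string : String), Dom_get_index_of_end_of_first_course_name course_string → Spec_get_index_of_end_of_first_course_name course_string (get_index_of_end_of_first_course_name course_string)

-- ===== LEMMAS AND PROOFS =====

def pvP1 : List Char := [':']
def pvP2 : List Char := [')']
def pvPA : List Char := [' ', 'a', 'n', 'd', ' ']
def pvPO : List Char := [' ', 'o', 'r', ' ']

def pvCands (cs : List Char) : List Int :=
  ([pvP1, pvP2, pvPA, pvPO].map (fun q => PySem.Chars.find cs q)).filter (fun p => p ≠ -1)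

def pvAltVal (cs : List Char) : Int :=
  match PySem.List.min? (pvCands cs) (fun x => x) with
  | some m => m - 1
  | none => (cs.length : Int) - 1

theorem pv_infix_snoc {p l : List Char} {c : Char}
    (h : p <:+: l ++ [c]) (hn : ¬ p <:+: l) : p <:+ l ++ [c] := by
  obtain ⟨s, t, hst⟩ := h
  rcases t.eq_nil_or_concat with rfl | ⟨t', d, rfl⟩
  · exact ⟨s, by simpa using hst⟩
  · exfalso
    apply hn
    have h2 : (s ++ p ++ t') ++ [d] = l ++ [c] := by simpa using hst
    exact ⟨s, t', List.append_inj_left' h2 rfl⟩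

theorem pv_find_eq {cs p : List Char} {k : Nat}
    (h1 : p <+: cs.drop k) (h2 : ∀ j < k, ¬ p <+: cs.drop j) :
    PySem.Chars.find cs p = (k : Int) := by
  have hin : p <:+: cs := h1.isInfix.trans (cs.drop_suffix k).isInfix
  have hnn : 0 ≤ PySem.Chars.find cs p := (PySem.Chars.find_nonneg_iff cs p).2 hin
  obtain ⟨hp, hmin⟩ := PySem.Chars.find_spec hnn
  have : (PySem.Chars.find cs p).toNat = k := by
    rcases lt_trichotomy (PySem.Chars.find cs p).toNat k with h | h | h
    · exact absurd hp (h2 _ h)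
    · exact h
    · exact absurd h1 (hmin _ h)
  omega

theorem pv_min?_eq {l : List Int} {m : Int}
    (hm : m ∈ l) (hle : ∀ x ∈ l, m ≤ x) :
    PySem.List.min? l (fun x => x) = some m := by
  cases h : PySem.List.min? l (fun x => x) with
  | none => exact absurd ((PySem.List.min?_eq_none_iff l _).1 h ▸ hm) (List.not_mem_nil)
  | some m' =>
    have h1 := PySem.List.min?_mem h
    have h2 := PySem.List.min?_isMin h m hm
    have h3 := hle m' h1
    simp only [] at h2
    exact congrArg some (le_antisymm h3 h2).symm

theorem pv_char {cs q : List Char} {f off : Nat} (h : q <+: cs.drop f)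
    (hoff : off < q.length) (hfl : f + off < cs.length) : cs[f + off] = q[off] := by
  have h1 : (cs.drop f)[off]'(by simp; omega) = q[off] := (List.IsPrefix.getElem h hoff).symm
  simpa using h1

theorem pv_no_early {cs q : List Char} {i j : Nat} (hq : ¬ q <:+: cs.take i)
    (hj : q <+: cs.drop j) : i < j + q.length := by
  by_contra hle
  push Not at hle
  apply hq
  have h1 : q <+: (cs.drop j).take (i - j) := List.prefix_take_iff.2 ⟨hj, by omega⟩
  have h2 : (cs.take i).drop j = (cs.drop j).take (i - j) := by rw [List.drop_take]
  exact (h2 ▸ h1).isInfix.trans ((cs.take i).drop_suffix j).isInfix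

theorem pv_suffix_take {cs p : List Char} {i : Nat} (hlt : i < cs.length)
    (h : p <:+ cs.take (i+1)) : p.length ≤ i + 1 ∧ p <+: cs.drop (i + 1 - p.length) := by
  obtain ⟨s, hs⟩ := h
  have hlen : s.length + p.length = i + 1 := by
    have := congrArg List.length hs
    simp at this; omega
  have hcs : cs = s ++ (p ++ cs.drop (i+1)) := by
    conv_lhs => rw [← List.take_append_drop (i+1) cs]
    rw [← hs]; simp
  refine ⟨by omega, ?_⟩
  have hd : cs.drop (i + 1 - p.length) = p ++ cs.drop (i+1) := by
    have hsl : i + 1 - p.length = s.length := by omega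
    rw [hsl]
    conv_lhs => rw [hcs]
    simp
  rw [hd]
  exact List.prefix_append p _

theorem pv_lb_len {cs q : List Char} {i : Nat} (hq : ¬ q <:+: cs.take i)
    (hx : PySem.Chars.find cs q ≠ -1) : (i : Int) + 1 - q.length ≤ PySem.Chars.find cs q := by
  have hnn : 0 ≤ PySem.Chars.find cs q := by
    have := PySem.Chars.neg_one_le_find cs q
    omega
  obtain ⟨hp, -⟩ := PySem.Chars.find_spec hnn
  have := pv_no_early hq hp
  omega

theorem pv_lb_miss {cs q : List Char} {i : Nat} (hlt : i < cs.length)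
    (hq : ¬ q <:+: cs.take i) (hx : PySem.Chars.find cs q ≠ -1)
    (hci : cs[i] ∉ q) : (i : Int) < PySem.Chars.find cs q := by
  have hnn : 0 ≤ PySem.Chars.find cs q := by
    have := PySem.Chars.neg_one_le_find cs q
    omega
  obtain ⟨hp, -⟩ := PySem.Chars.find_spec hnn
  have hie := pv_no_early hq hp
  by_contra hle
  push Not at hle
  have hfi : (PySem.Chars.find cs q).toNat ≤ i := by omega
  have hch := pv_char (f := (PySem.Chars.find cs q).toNat)
      (off := i - (PySem.Chars.find cs q).toNat) hp (by omega) (by omega)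
  have hidx : (PySem.Chars.find cs q).toNat + (i - (PySem.Chars.find cs q).toNat) = i := by omega
  simp only [hidx] at hch
  exact hci (hch ▸ List.getElem_mem _)

theorem pv_find_fired {cs p : List Char} {i : Nat}
    (hq : ¬ p <:+: cs.take i) (hp : p <+: cs.drop (i + 1 - p.length)) (hL : p.length ≤ i + 1) :
    PySem.Chars.find cs p = ((i + 1 - p.length : Nat) : Int) := by
  apply pv_find_eq hp
  intro j hj hpre
  have := pv_no_early hq hpre
  omega

theorem pv_mem_cands {cs q : List Char} (hq : q ∈ [pvP1, pvP2, pvPA, pvPO])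
    (h : PySem.Chars.find cs q ≠ -1) : PySem.Chars.find cs q ∈ pvCands cs := by
  unfold pvCands
  simp only [List.mem_filter, List.mem_map]
  exact ⟨⟨q, hq, rfl⟩, by simpa using h⟩

theorem pv_cands_cases {cs : List Char} {x : Int} (hx : x ∈ pvCands cs) :
    (x = PySem.Chars.find cs pvP1 ∨ x = PySem.Chars.find cs pvP2 ∨
     x = PySem.Chars.find cs pvPA ∨ x = PySem.Chars.find cs pvPO) ∧ x ≠ -1 := by
  unfold pvCands at hx
  simp only [List.mem_filter, List.mem_map, List.mem_cons, List.not_mem_nil, or_false,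
    decide_not, Bool.not_eq_eq_eq_not, Bool.not_true, decide_eq_false_iff_not] at hx
  obtain ⟨⟨q, hq, rfl⟩, hne⟩ := hx
  refine ⟨?_, hne⟩
  rcases hq with rfl | rfl | rfl | rfl <;> tauto

theorem pv_alt_eq_of_min {cs : List Char} {k : Nat}
    (hk : (k : Int) ∈ pvCands cs) (hlb : ∀ x ∈ pvCands cs, (k : Int) ≤ x) :
    pvAltVal cs = (k : Int) - 1 := by
  unfold pvAltVal
  rw [pv_min?_eq hk hlb]

theorem pv_all_neg {cs : List Char} (h1 : ¬ pvP1 <:+: cs) (h2 : ¬ pvP2 <:+: cs)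
    (ha : ¬ pvPA <:+: cs) (ho : ¬ pvPO <:+: cs) : pvAltVal cs = (cs.length : Int) - 1 := by
  unfold pvAltVal pvCands
  simp only [List.map_cons, List.map_nil]
  rw [(PySem.Chars.find_eq_neg_one_iff cs pvP1).2 h1, (PySem.Chars.find_eq_neg_one_iff cs pvP2).2 h2,
      (PySem.Chars.find_eq_neg_one_iff cs pvPA).2 ha, (PySem.Chars.find_eq_neg_one_iff cs pvPO).2 ho]
  rfl

theorem pv_snoc_last {l : List Char} {x c : Char} (h : [x] <:+ l ++ [c]) : x = c := by
  obtain ⟨s, hs⟩ := h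
  have := List.append_inj_right' hs (by simp)
  simpa using this

theorem pv_fired1 {cs : List Char} {i : Nat} (hlt : i < cs.length) (hc : cs[i] = ':')
    (h1 : ¬ pvP1 <:+: cs.take i) (h2 : ¬ pvP2 <:+: cs.take i)
    (ha : ¬ pvPA <:+: cs.take i) (ho : ¬ pvPO <:+: cs.take i) :
    pvAltVal cs = (i : Int) - 1 := by
  have hp : pvP1 <+: cs.drop (i + 1 - pvP1.length) := by
    have hidx : i + 1 - pvP1.length = i := by simp [pvP1]
    rw [hidx, List.drop_eq_getElem_cons hlt, hc]
    exact ⟨cs.drop (i+1), rfl⟩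
  have hfind : PySem.Chars.find cs pvP1 = (i : Int) := by
    rw [pv_find_fired h1 hp (by simp [pvP1])]
    simp [pvP1]
  have hk : ((i : Nat) : Int) ∈ pvCands cs := by
    rw [← hfind]
    exact pv_mem_cands (by simp) (by rw [hfind]; omega)
  have hlb : ∀ x ∈ pvCands cs, ((i : Nat) : Int) ≤ x := by
    intro x hx
    obtain ⟨hcase, hne⟩ := pv_cands_cases hx
    rcases hcase with rfl | rfl | rfl | rfl
    · rw [hfind]
    · have := pv_lb_len h2 hne; have hl2 : pvP2.length = 1 := rfl; omega
    · have := pv_lb_miss hlt ha hne (by rw [hc]; decide); omega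
    · have := pv_lb_miss hlt ho hne (by rw [hc]; decide); omega
  rw [pv_alt_eq_of_min hk hlb]

theorem pv_fired2 {cs : List Char} {i : Nat} (hlt : i < cs.length)
    (hsuf : pvP2 <:+ cs.take (i+1))
    (h1 : ¬ pvP1 <:+: cs.take i) (h2 : ¬ pvP2 <:+: cs.take i)
    (ha : ¬ pvPA <:+: cs.take i) (ho : ¬ pvPO <:+: cs.take i) :
    pvAltVal cs = (i : Int) - 1 := by
  obtain ⟨hL, hp⟩ := pv_suffix_take hlt hsuf
  have hidx : i + 1 - pvP2.length + 0 = i := by simp [pvP2]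
  have hc : cs[i] = ')' := by
    have h0 := pv_char (off := 0) hp (by simp [pvP2]) (by simp [pvP2]; omega)
    simp only [hidx] at h0
    simpa [pvP2] using h0
  have hfind : PySem.Chars.find cs pvP2 = (i : Int) := by
    rw [pv_find_fired h2 hp hL]
    simp [pvP2]
  have hk : ((i : Nat) : Int) ∈ pvCands cs := by
    rw [← hfind]
    exact pv_mem_cands (by simp) (by rw [hfind]; omega)
  have hlb : ∀ x ∈ pvCands cs, ((i : Nat) : Int) ≤ x := by
    intro x hx
    obtain ⟨hcase, hne⟩ := pv_cands_cases hx
    rcases hcase with rfl | rfl | rfl | rfl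
    · have := pv_lb_len h1 hne; have hl1 : pvP1.length = 1 := rfl; omega
    · rw [hfind]
    · have := pv_lb_miss hlt ha hne (by rw [hc]; decide); omega
    · have := pv_lb_miss hlt ho hne (by rw [hc]; decide); omega
  rw [pv_alt_eq_of_min hk hlb]

theorem pv_firedA {cs : List Char} {i : Nat} (hlt : i < cs.length)
    (hsuf : pvPA <:+ cs.take (i+1))
    (h1 : ¬ pvP1 <:+: cs.take i) (h2 : ¬ pvP2 <:+: cs.take i)
    (ha : ¬ pvPA <:+: cs.take i) (ho : ¬ pvPO <:+: cs.take i) :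
    pvAltVal cs = (i : Int) - 5 := by
  obtain ⟨hL, hp⟩ := pv_suffix_take hlt hsuf
  have hL' : 5 ≤ i + 1 := by simpa [pvPA] using hL
  have hfind : PySem.Chars.find cs pvPA = ((i + 1 - 5 : Nat) : Int) := by
    rw [pv_find_fired ha hp hL]
    simp [pvPA]
  have hk : ((i + 1 - 5 : Nat) : Int) ∈ pvCands cs := by
    rw [← hfind]
    exact pv_mem_cands (by simp) (by rw [hfind]; omega)
  have hlb : ∀ x ∈ pvCands cs, ((i + 1 - 5 : Nat) : Int) ≤ x := by
    intro x hx
    obtain ⟨hcase, hne⟩ := pv_cands_cases hx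
    rcases hcase with rfl | rfl | rfl | rfl
    · have := pv_lb_len h1 hne; have hl1 : pvP1.length = 1 := rfl; omega
    · have := pv_lb_len h2 hne; have hl2 : pvP2.length = 1 := rfl; omega
    · rw [hfind]
    · have := pv_lb_len ho hne; have hlO : pvPO.length = 4 := rfl; omega
  rw [pv_alt_eq_of_min hk hlb]
  omega

theorem pv_firedO {cs : List Char} {i : Nat} (hlt : i < cs.length)
    (hsuf : pvPO <:+ cs.take (i+1))
    (h1 : ¬ pvP1 <:+: cs.take i) (h2 : ¬ pvP2 <:+: cs.take i)
    (ha : ¬ pvPA <:+: cs.take i) (ho : ¬ pvPO <:+: cs.take i) :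
    pvAltVal cs = (i : Int) - 4 := by
  obtain ⟨hL, hp⟩ := pv_suffix_take hlt hsuf
  have hL' : 4 ≤ i + 1 := by simpa [pvPO] using hL
  have hfind : PySem.Chars.find cs pvPO = ((i + 1 - 4 : Nat) : Int) := by
    rw [pv_find_fired ho hp hL]
    simp [pvPO]
  have hk : ((i + 1 - 4 : Nat) : Int) ∈ pvCands cs := by
    rw [← hfind]
    exact pv_mem_cands (by simp) (by rw [hfind]; omega)
  have hlb : ∀ x ∈ pvCands cs, ((i + 1 - 4 : Nat) : Int) ≤ x := by
    intro x hx
    obtain ⟨hcase, hne⟩ := pv_cands_cases hx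
    rcases hcase with rfl | rfl | rfl | rfl
    · have := pv_lb_len h1 hne; have hl1 : pvP1.length = 1 := rfl; omega
    · have := pv_lb_len h2 hne; have hl2 : pvP2.length = 1 := rfl; omega
    · -- the " and " occurrence cannot start before i-3: its 'd' would clash with our 'r'
      have hbx := pv_lb_len ha hne
      by_contra hxc
      push Not at hxc
      have hge : 0 ≤ PySem.Chars.find cs pvPA := by
        have := PySem.Chars.neg_one_le_find cs pvPA
        omega
      obtain ⟨hpa, -⟩ := PySem.Chars.find_spec hge
      have hlA : pvPA.length = 5 := rfl
      have hi4 : 4 ≤ i := by omega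
      have hf : (PySem.Chars.find cs pvPA).toNat = i - 4 := by omega
      have hd := pv_char (off := 3) hpa (by simp [pvPA]) (by omega)
      have hr := pv_char (off := 2) hp (by simp [pvPO]) (by simp [pvPO]; omega)
      have e1 : (PySem.Chars.find cs pvPA).toNat + 3 = i - 1 := by omega
      have e2 : i + 1 - pvPO.length + 2 = i - 1 := by simp [pvPO]; omega
      simp only [e1] at hd
      simp only [e2] at hr
      exact absurd (hd.symm.trans hr) (by decide)
    · rw [hfind]
  rw [pv_alt_eq_of_min hk hlb]
  omega

theorem pv_loop (n : Nat) : ∀ (cs : List Char) (i : Nat), cs.length ≤ i + n → i ≤ cs.length →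
    ¬ pvP1 <:+: cs.take i → ¬ pvP2 <:+: cs.take i → ¬ pvPA <:+: cs.take i → ¬ pvPO <:+: cs.take i →
    pvALoop cs (cs.take i) i = pvAltVal cs := by
  induction n with
  | zero =>
    intro cs i hn hi h1 h2 ha ho
    have hieq : i = cs.length := by omega
    subst hieq
    rw [pvALoop, dif_neg (lt_irrefl _)]
    rw [List.take_length] at h1 h2 ha ho
    rw [pv_all_neg h1 h2 ha ho]
  | succ n ih =>
    intro cs i hn hi h1 h2 ha ho
    by_cases hlt : i < cs.length
    · rw [pvALoop]
      simp only [dif_pos hlt]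
      have ht : cs.take i ++ [cs[i]] = cs.take (i+1) := by
        have := List.take_concat_get hlt
        simp only [List.concat_eq_append] at this
        exact this
      rw [ht]
      by_cases hc1 : cs[i] = ':'
      · rw [if_pos hc1]
        exact (pv_fired1 hlt hc1 h1 h2 ha ho).symm
      · rw [if_neg hc1]
        by_cases hc2 : PySem.Chars.isIn [')'] (cs.take (i+1)) = true
        · rw [if_pos hc2]
          have hin : pvP2 <:+: cs.take (i+1) := (PySem.Chars.isIn_iff_infix _ _).1 hc2
          rw [← ht] at hin
          have hsuf : pvP2 <:+ cs.take (i+1) := by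
            rw [← ht]
            exact pv_infix_snoc hin h2
          exact (pv_fired2 hlt hsuf h1 h2 ha ho).symm
        · rw [if_neg hc2]
          have hn2 : ¬ pvP2 <:+: cs.take (i+1) := by
            intro hin
            exact hc2 ((PySem.Chars.isIn_iff_infix _ _).2 hin)
          by_cases hcA : PySem.Chars.isIn [' ', 'a', 'n', 'd', ' '] (cs.take (i+1)) = true
          · rw [if_pos hcA]
            have hin : pvPA <:+: cs.take (i+1) := (PySem.Chars.isIn_iff_infix _ _).1 hcA
            rw [← ht] at hin
            have hsuf : pvPA <:+ cs.take (i+1) := by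
              rw [← ht]
              exact pv_infix_snoc hin ha
            exact (pv_firedA hlt hsuf h1 h2 ha ho).symm
          · rw [if_neg hcA]
            have hnA : ¬ pvPA <:+: cs.take (i+1) := by
              intro hin
              exact hcA ((PySem.Chars.isIn_iff_infix _ _).2 hin)
            by_cases hcO : PySem.Chars.isIn [' ', 'o', 'r', ' '] (cs.take (i+1)) = true
            · rw [if_pos hcO]
              have hin : pvPO <:+: cs.take (i+1) := (PySem.Chars.isIn_iff_infix _ _).1 hcO
              rw [← ht] at hin
              have hsuf : pvPO <:+ cs.take (i+1) := by
                rw [← ht]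
                exact pv_infix_snoc hin ho
              exact (pv_firedO hlt hsuf h1 h2 ha ho).symm
            · rw [if_neg hcO]
              have hnO : ¬ pvPO <:+: cs.take (i+1) := by
                intro hin
                exact hcO ((PySem.Chars.isIn_iff_infix _ _).2 hin)
              have hn1 : ¬ pvP1 <:+: cs.take (i+1) := by
                intro hin
                rw [← ht] at hin
                exact hc1 (pv_snoc_last (pv_infix_snoc hin h1)).symm
              exact ih cs (i+1) (by omega) (by omega) hn1 hn2 hnA hnO
    · have hieq : i = cs.length := by omega
      subst hieq
      rw [pvALoop, dif_neg (lt_irrefl _)]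
      rw [List.take_length] at h1 h2 ha ho
      rw [pv_all_neg h1 h2 ha ho]

theorem pv_alt_bridge (s : String) : get_index_of_end_of_first_course_name_alt s = pvAltVal s.toList := by
  unfold get_index_of_end_of_first_course_name_alt
  have h1 : ([":", ")", " and ", " or "].map (fun t => PySem.Str.find s t)) =
      [pvP1, pvP2, pvPA, pvPO].map (fun q => PySem.Chars.find s.toList q) := by
    simp [pvP1, pvP2, pvPA, pvPO]
  have h2 : PySem.Str.len s = ((s.toList.length : Nat) : Int) := by
    simp [PySem.Str.len]
  rw [h1, h2]
  rfl

theorem pv_main (s : String) :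
    get_index_of_end_of_first_course_name s = get_index_of_end_of_first_course_name_alt s := by
  rw [pv_alt_bridge]
  unfold get_index_of_end_of_first_course_name
  have h0 : (s.toList.take 0) = ([] : List Char) := rfl
  rw [← h0]
  refine pv_loop s.toList.length s.toList 0 (by omega) (by omega) ?_ ?_ ?_ ?_ <;>
    · rw [h0]
      decide

-- ===== VERDICT (by name: the statement is the Claim_ definition above) =====
theorem get_index_of_end_of_first_course_name_spec : Claim_equal_get_index_of_end_of_first_course_name := by
  intro s _
  exact pv_main s
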